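-- pv_equiv track=rewrite | github.com/Nick-Mur/itmo_algorithms_and_data_structures | lab3/Task3/src/ScarecrowSortChecker.py | can_sort
-- ===== SOURCE A (Python) =====
-- from typing import List
--
-- def can_sort(n: int, k: int, arr: List[int]) -> bool:
--     """
--     Определяет, можно ли отсортировать массив по неубыванию, используя
--     метод "Сортировка пугалом", где можно менять местами элементы на расстоянии k.
--
--     :param n: Количество матрёшек.
--     :param k: Размах рук (расстояние для обмена).
--     :param arr: Список размеров матрёшек.
--     :return: True, если сортировка возможна, иначе False.
--     :raises ValueError: Если длина массива не равна n.
--     """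
--     if len(arr) != n:
--         raise ValueError(f"Ожидалась длина массива {n}, но получено {len(arr)}.")
--
--     # Создаём список групп, где каждая группа соответствует позиции по модулю k
--     groups = [[] for _ in range(k)]
--     for index in range(n):
--         groups[index % k].append(arr[index])
--
--     # Сортируем каждую группу по неубыванию
--     for group in groups:
--         group.sort()
--
--     # Сортированный массив для сравнения
--     sorted_arr = sorted(arr)
--
--     # Проверяем, можно ли собрать отсортированный массив из отсортированных групп
--     for index in range(n):
--         group_index = index % k
--         element_index = index // k
--         if element_index >= len(groups[group_index]):
--             # Это условие обычно не должно возникать, но добавляем для безопасности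
--             return False
--         actual_value = groups[group_index][element_index]
--         expected_value = sorted_arr[index]
--         if actual_value != expected_value:
--             return False
--     return True
-- ===== SOURCE B (Python) =====
-- from typing import List
--
--
-- def can_sort(n: int, k: int, arr: List[int]) -> bool:
--     """Scarecrow sort check by counting: swaps at distance k only permute
--     elements within a residue class mod k, so the array is sortable iff, for
--     every residue r and value v, the number of positions i = r (mod k) holding
--     v in arr equals the number holding v in sorted(arr).  One balance dict
--     keyed by (i % k, value) is incremented for arr and decremented for the
--     sorted array; sortable iff every balance is zero."""
--     if len(arr) != n:
--         raise ValueError(f"Ожидалась длина массива {n}, но получено {len(arr)}.")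
--
--     target = sorted(arr)
--     balance = {}
--     for i in range(n):
--         key1 = (i % k, arr[i])
--         balance[key1] = balance.get(key1, 0) + 1
--         key2 = (i % k, target[i])
--         balance[key2] = balance.get(key2, 0) - 1
--     return all(v == 0 for v in balance.values())
-- ===== Notes on version B (the rewrite author's own statement) =====
-- stated objective: alternative
-- what changed: B drops A's bucket lists, per-bucket sorts and element-by-element reconstruction scan entirely: after the one sort of arr it makes a single counting pass with a dict keyed by (index % k, value), +1 for arr and -1 for sorted(arr), and answers True iff every balance is zero (per-residue multiset equality by counting instead of sort-and-compare).
import Mathlib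
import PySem

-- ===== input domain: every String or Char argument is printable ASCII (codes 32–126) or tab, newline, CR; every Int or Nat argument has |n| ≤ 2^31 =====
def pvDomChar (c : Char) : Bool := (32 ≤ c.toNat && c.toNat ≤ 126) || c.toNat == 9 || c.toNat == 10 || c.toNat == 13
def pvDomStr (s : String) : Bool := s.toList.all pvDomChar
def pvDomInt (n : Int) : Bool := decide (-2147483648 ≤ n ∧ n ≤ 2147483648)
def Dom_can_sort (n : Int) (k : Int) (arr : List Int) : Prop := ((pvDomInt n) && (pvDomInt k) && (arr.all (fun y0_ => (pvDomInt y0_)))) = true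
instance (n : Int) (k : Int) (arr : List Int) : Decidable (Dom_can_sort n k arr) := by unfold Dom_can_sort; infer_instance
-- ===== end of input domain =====

-- B replaces A's bucket lists, per-bucket sorts and element-by-element reconstruction by one
-- counting pass: a dict keyed by (index % k, value), +1 for arr and -1 for sorted(arr); all zero ⇔ sortable.


-- ===== PORT A =====
-- 'raise ValueError' (len(arr) ≠ n) is excluded by Pre_; the port returns false there.
-- Under Pre_ every index is nonnegative and k ≥ 1 whenever the loops run, so Nat-valued
-- i % k.toNat / i / k.toNat is exactly Python's index % k / index // k, and range(n) is
-- List.range arr.length (the guard made n = len(arr)).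
def can_sort (n : Int) (k : Int) (arr : List Int) : Bool :=
  if (arr.length : Int) ≠ n then false
  else
    let kn := k.toNat
    -- groups = [[] for _ in range(k)]; for index in range(n): groups[index % k].append(arr[index])
    let groups := (List.range arr.length).foldl
      (fun gs i => gs.set (i % kn) (gs.getD (i % kn) [] ++ [arr.getD i 0]))
      (List.replicate kn ([] : List Int))
    -- for group in groups: group.sort()
    let sgroups := groups.map (fun g => PySem.List.sorted g (fun x => x) false)
    let sortedArr := PySem.List.sorted arr (fun x => x) false
    -- the final scan's early 'return False's are pure, so it is List.all
    (List.range arr.length).all (fun i =>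
      let gi := i % kn
      let ei := i / kn
      if (sgroups.getD gi []).length ≤ ei then false
      else (sgroups.getD gi []).getD ei 0 == sortedArr.getD i 0)

-- ===== PORT B =====
-- the loop body of Source B: two dict updates, balance[key1] += 1 for arr, balance[key2] -= 1
-- for target (get(key, 0) ported as Dict.getD _ _ 0, assignment as Dict.insert).
def bstep (k : Int) (arr target : List Int) (d : PySem.Dict (Int × Int) Int) (i : Nat) :
    PySem.Dict (Int × Int) Int :=
  let key1 : Int × Int := (PySem.Int.mod (i : Int) k, arr.getD i 0)
  let d1 := PySem.Dict.insert d key1 (PySem.Dict.getD d key1 0 + 1)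
  let key2 : Int × Int := (PySem.Int.mod (i : Int) k, target.getD i 0)
  PySem.Dict.insert d1 key2 (PySem.Dict.getD d1 key2 0 - 1)

-- same length guard as A (Source B keeps it); then target = sorted(arr), the counting loop
-- over range(n) (= range(len(arr)) under the guard), and all(v == 0 for v in values()).
def can_sort_alt (n : Int) (k : Int) (arr : List Int) : Bool :=
  if (arr.length : Int) ≠ n then false
  else
    let target := PySem.List.sorted arr (fun x => x) false
    let balance := (List.range arr.length).foldl (bstep k arr target) PySem.Dict.empty
    (PySem.Dict.values balance).all (fun v => v == 0)

-- ===== PRECONDITION & SPEC =====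
-- Pre_ is exactly where the Python A returns: len(arr) = n, and k ≥ 1 unless the loops are
-- empty (arr = []); otherwise A raises (ValueError on the length guard, ZeroDivisionError
-- for k = 0, IndexError for k < 0).
def Pre_can_sort (n : Int) (k : Int) (arr : List Int) : Prop :=
  (arr.length : Int) = n ∧ (1 ≤ k ∨ arr = [])
instance (n : Int) (k : Int) (arr : List Int) : Decidable (Pre_can_sort n k arr) := by
  unfold Pre_can_sort; infer_instance

def pvWitness_can_sort : Int × Int × List Int := (3, 2, [2, 1, 3])

def Spec_can_sort (n : Int) (k : Int) (arr : List Int) (out : Bool) : Prop := out = can_sort_alt n k arr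
instance (n : Int) (k : Int) (arr : List Int) (out : Bool) : Decidable (Spec_can_sort n k arr out) := by unfold Spec_can_sort; infer_instance

-- ===== CLAIM (what is proved, stated in full; the proofs are below) =====
def Claim_equal_can_sort : Prop := ∀ (n : Int) (k : Int) (arr : List Int), Dom_can_sort n k arr → Pre_can_sort n k arr → Spec_can_sort n k arr (can_sort n k arr)

-- ===== LEMMAS AND PROOFS =====

-- every k-th element of a list, starting with its head (positions 0, k, 2k, … for k ≥ 1)
def stride (k : Nat) : List Int → List Int
  | [] => []
  | x :: xs => x :: stride k (xs.drop (k - 1))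
termination_by ys => ys.length
decreasing_by simp

theorem length_stride (k : Nat) (hk : 0 < k) (ys : List Int) :
    (stride k ys).length = (ys.length + k - 1) / k := by
  induction ys using stride.induct k with
  | case1 => simp [stride]; rw [Nat.div_eq_of_lt (by omega)]
  | case2 x xs ih =>
    simp only [stride, List.length_cons, List.length_drop] at *
    rw [ih]
    rcases Nat.lt_or_ge xs.length (k-1) with h | h
    · have h1 : xs.length - (k - 1) + k - 1 = k - 1 := by omega
      have h2 : xs.length + 1 + k - 1 = xs.length + k := by omega
      rw [h1, h2, Nat.add_div_right _ hk, Nat.div_eq_of_lt (by omega),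
        Nat.div_eq_of_lt (by omega)]
    · have h1 : xs.length - (k - 1) + k - 1 = xs.length := by omega
      have h2 : xs.length + 1 + k - 1 = xs.length + k := by omega
      rw [h1, h2, Nat.add_div_right _ hk]

theorem getElem?_stride (k : Nat) (hk : 0 < k) (ys : List Int) (j : Nat) :
    (stride k ys)[j]? = ys[k * j]? := by
  induction ys using stride.induct k generalizing j with
  | case1 => simp [stride]
  | case2 x xs ih =>
    cases j with
    | zero => simp [stride]
    | succ j =>
      have h1 : k * (j + 1) = (k - 1 + k * j) + 1 := by
        have hm : k * (j + 1) = k * j + k := Nat.mul_succ k j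
        omega
      simp only [stride, List.getElem?_cons_succ, ih, List.getElem?_drop, h1]

theorem stride_append_singleton (k : Nat) (hk : 0 < k) (l : List Int) (x : Int) :
    stride k (l ++ [x]) = if l.length % k = 0 then stride k l ++ [x] else stride k l := by
  induction l using stride.induct k with
  | case1 => simp [stride]
  | case2 y t ih =>
    simp only [List.cons_append, stride, List.length_cons]
    rcases Nat.lt_or_ge t.length (k - 1) with h | h
    · have hd : (t ++ [x]).drop (k - 1) = [] := by
        apply List.drop_eq_nil_of_le; simp; omega
      have hd2 : t.drop (k - 1) = [] := by
        apply List.drop_eq_nil_of_le; omega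
      have hm := Nat.mod_eq_of_lt (show t.length + 1 < k by omega)
      rw [hd, if_neg (by omega)]
      simp [stride, hd2]
    · have hd : (t ++ [x]).drop (k - 1) = t.drop (k - 1) ++ [x] :=
        List.drop_append_of_le_length (by omega)
      rw [hd, ih]
      have hlen : (t.drop (k - 1)).length = t.length - (k - 1) := List.length_drop ..
      have hmod : (t.length - (k - 1)) % k = (t.length + 1) % k := by
        have h2 : t.length - (k - 1) + k = t.length + 1 := by omega
        rw [← h2, Nat.add_mod_right]
      rw [hlen, hmod]
      split <;> simp

theorem stride_sublist (k : Nat) (ys : List Int) : (stride k ys).Sublist ys := by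
  induction ys using stride.induct k with
  | case1 => simp [stride]
  | case2 x xs ih =>
    rw [stride]
    exact List.Sublist.cons₂ x (ih.trans (List.drop_sublist _ _))

theorem groups_eq (k : Nat) (hk : 0 < k) (arr : List Int) (m : Nat) (hm : m ≤ arr.length) :
    (List.range m).foldl
      (fun gs i => gs.set (i % k) (gs.getD (i % k) [] ++ [arr.getD i 0]))
      (List.replicate k ([] : List Int))
    = (List.range k).map (fun r => stride k ((arr.take m).drop r)) := by
  induction m with
  | zero =>
    simp only [List.range_zero, List.foldl_nil, List.take_zero, List.drop_nil]
    symm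
    rw [List.eq_replicate_iff]
    refine ⟨by simp, ?_⟩
    intro b hb
    obtain ⟨r, _, hr⟩ := List.mem_map.mp hb
    rw [← hr]; simp [stride]
  | succ m ih =>
    rw [List.range_succ, List.foldl_append, ih (by omega), List.foldl_cons, List.foldl_nil]
    have hmk : m % k < k := Nat.mod_lt _ hk
    have hmlen : m < arr.length := by omega
    have hgetD : ((List.range k).map (fun r => stride k ((arr.take m).drop r))).getD (m % k) []
        = stride k ((arr.take m).drop (m % k)) := by
      rw [List.getD_eq_getElem _ _ (by simpa using hmk)]
      simp
    rw [hgetD, List.getD_eq_getElem _ _ hmlen]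
    have htake : arr.take (m + 1) = arr.take m ++ [arr[m]] := by
      rw [List.take_add_one, List.getElem?_eq_getElem hmlen]
      rfl
    have hlen_take : (arr.take m).length = m := by simp [List.length_take]; omega
    apply List.ext_getElem
    · simp
    · intro r h1 h2
      simp only [List.getElem_set, List.getElem_map, List.getElem_range]
      have hr : r < k := by simpa using h2
      split
      case isTrue heq =>
        subst heq
        have hdrop : (arr.take (m + 1)).drop (m % k) = (arr.take m).drop (m % k) ++ [arr[m]] := by
          rw [htake, List.drop_append_of_le_length (by rw [hlen_take]; exact Nat.mod_le m k)]
        rw [hdrop, stride_append_singleton k hk, if_pos]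
        rw [List.length_drop, hlen_take]
        have hq : m - m % k = k * (m / k) := by
          have := Nat.div_add_mod m k; omega
        rw [hq, Nat.mul_mod_right]
      case isFalse hne =>
        rcases Nat.lt_or_ge m r with h | h
        · rw [List.drop_eq_nil_of_le (by omega), List.drop_eq_nil_of_le (by simp; omega)]
        · have hdrop : (arr.take (m + 1)).drop r = (arr.take m).drop r ++ [arr[m]] := by
            rw [htake, List.drop_append_of_le_length (by rw [hlen_take]; exact h)]
          rw [hdrop, stride_append_singleton k hk, if_neg]
          rw [List.length_drop, hlen_take]
          intro h0
          obtain ⟨q, hq⟩ := Nat.dvd_of_mod_eq_zero h0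
          have hm2 : m = k * q + r := by omega
          rw [hm2, Nat.mul_add_mod, Nat.mod_eq_of_lt hr] at hne
          exact hne rfl

theorem lt_ceil_iff (kn a j : Nat) (h : 0 < kn) : j < (a + kn - 1) / kn ↔ kn * j < a := by
  rw [Nat.lt_iff_add_one_le, Nat.le_div_iff_mul_le h]
  have h1 : (j + 1) * kn = kn * j + kn := by ring
  omega

-- A's final scan equals: for every residue class, the sorted bucket is the matching
-- stride-kn sublist of the sorted array.
theorem sort_core (kn : Nat) (hkn : 0 < kn) (arr : List Int) :
    ((List.range arr.length).all (fun i =>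
        if (((List.range kn).map (fun r => PySem.List.sorted (stride kn (arr.drop r)) (fun x => x) false)).getD (i % kn) []).length ≤ i / kn then false
        else (((List.range kn).map (fun r => PySem.List.sorted (stride kn (arr.drop r)) (fun x => x) false)).getD (i % kn) []).getD (i / kn) 0 == (PySem.List.sorted arr (fun x => x) false).getD i 0))
    = true ↔ (∀ r < kn,
        PySem.List.sorted (stride kn (arr.drop r)) (fun x => x) false
          = stride kn ((PySem.List.sorted arr (fun x => x) false).drop r)) := by
  set S := PySem.List.sorted arr (fun x => x) false with hSdef
  have hS : S.length = arr.length := PySem.List.length_sorted arr (fun x => x) false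
  have hgetD : ∀ r, r < kn →
      ((List.range kn).map (fun r => PySem.List.sorted (stride kn (arr.drop r)) (fun x => x) false)).getD r []
        = PySem.List.sorted (stride kn (arr.drop r)) (fun x => x) false := by
    intro r hr
    rw [List.getD_eq_getElem _ _ (by simpa using hr)]
    simp
  have hlenL : ∀ r, (PySem.List.sorted (stride kn (arr.drop r)) (fun x => x) false).length
      = (arr.length - r + kn - 1) / kn := by
    intro r
    rw [PySem.List.length_sorted, length_stride kn hkn, List.length_drop]
  have hlenR : ∀ r, (stride kn (S.drop r)).length = (arr.length - r + kn - 1) / kn := by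
    intro r
    rw [length_stride kn hkn, List.length_drop, hS]
  have hRel : ∀ r j, (stride kn (S.drop r))[j]? = S[r + kn * j]? := by
    intro r j
    rw [getElem?_stride kn hkn, List.getElem?_drop]
  simp only [List.all_eq_true, List.mem_range]
  constructor
  · -- A-side scan ⇒ per-residue equality
    intro hA r hr
    apply List.ext_getElem (by rw [hlenL, hlenR])
    intro j hj hj'
    have hjlt : kn * j < arr.length - r := by
      have h5 := hj
      rw [hlenL r] at h5
      exact (lt_ceil_iff kn _ j hkn).mp h5
    have hi : r + kn * j < arr.length := by omega
    have hbody := hA (r + kn * j) hi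
    simp only [Nat.add_mul_mod_self_left, Nat.mod_eq_of_lt hr,
      Nat.add_mul_div_left _ _ hkn, Nat.div_eq_of_lt hr, Nat.zero_add] at hbody
    rw [hgetD r hr] at hbody
    rw [if_neg (by omega), beq_iff_eq] at hbody
    have h2 : S.getD (r + kn * j) 0 = S[r + kn * j]'(by omega) :=
      List.getD_eq_getElem _ _ (by omega)
    have h3 : (stride kn (S.drop r))[j]? = some (S[r + kn * j]'(by omega)) := by
      rw [hRel r j, List.getElem?_eq_getElem]
    have h4 : (stride kn (S.drop r))[j]? = some ((stride kn (S.drop r))[j]'hj') :=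
      List.getElem?_eq_getElem hj'
    rw [← List.getD_eq_getElem _ 0 hj, hbody, h2]
    exact (Option.some.inj (h4.symm.trans h3)).symm
  · -- per-residue equality ⇒ A-side scan
    intro hB i hi
    have hr : i % kn < kn := Nat.mod_lt _ hkn
    have hLR := hB (i % kn) hr
    rw [hgetD _ hr]
    have hdm := Nat.div_add_mod i kn
    have hjlt : kn * (i / kn) < arr.length - i % kn := by omega
    have hj : i / kn < (PySem.List.sorted (stride kn (arr.drop (i % kn))) (fun x => x) false).length := by
      rw [hlenL, lt_ceil_iff kn _ _ hkn]
      exact hjlt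
    rw [if_neg (by omega), beq_iff_eq]
    have h2 : S.getD i 0 = S[i]'(by omega) := List.getD_eq_getElem _ _ (by omega)
    have h3 := hRel (i % kn) (i / kn)
    have hidx : i % kn + kn * (i / kn) = i := by omega
    rw [hidx] at h3
    rw [List.getElem?_eq_getElem (show i < S.length by omega)] at h3
    rw [List.getD_eq_getElem?_getD, hLR, h3, h2]
    rfl

-- per residue r: A's sorted-bucket equality is exactly a permutation statement
theorem sorted_eq_iff_perm (g h : List Int) (hh : h.Pairwise (· ≤ ·)) :
    PySem.List.sorted g (fun x => x) false = h ↔ g.Perm h := by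
  constructor
  · intro he
    have hp := PySem.List.sorted_perm g (fun x => x) false
    rw [he] at hp
    exact hp.symm
  · intro hp
    exact PySem.List.sorted_id_eq_of_perm_of_pairwise g h hp.symm hh

-- count of v among the stride-kn positions of l starting at r, as a countP over all indices
theorem count_stride (kn : Nat) (hkn : 0 < kn) (r : Nat) (hr : r < kn) (v : Int) (l : List Int) :
    (stride kn (l.drop r)).count v
      = (List.range l.length).countP (fun (i : Nat) => decide (i % kn = r ∧ l.getD i 0 = v)) := by
  induction l using List.reverseRecOn with
  | nil => simp [stride]
  | append_singleton l x ih =>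
    have hlen : (l ++ [x]).length = l.length + 1 := by simp
    rw [hlen, List.range_succ, List.countP_append]
    have hcongr : (List.range l.length).countP
        (fun i => decide (i % kn = r ∧ (l ++ [x]).getD i 0 = v))
        = (List.range l.length).countP (fun (i : Nat) => decide (i % kn = r ∧ l.getD i 0 = v)) := by
      apply List.countP_congr
      intro i hi
      have hil : i < l.length := List.mem_range.mp hi
      have : (l ++ [x]).getD i 0 = l.getD i 0 := by
        rw [List.getD_eq_getElem _ _ (by simp; omega), List.getD_eq_getElem _ _ hil,
          List.getElem_append_left hil]
      rw [this]
    rcases Nat.lt_or_ge l.length r with h | h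
    · -- r past the end: stride still empty, last index can't have residue r either
      have hd : (l ++ [x]).drop r = [] := List.drop_eq_nil_of_le (by simp; omega)
      have hd2 : l.drop r = [] := List.drop_eq_nil_of_le (by omega)
      rw [hd]
      rw [hd2] at ih
      rw [hcongr, ← ih]
      have : (List.countP (fun (i : Nat) => decide (i % kn = r ∧ (l ++ [x]).getD i 0 = v)) [l.length]) = 0 := by
        simp only [List.countP_cons, List.countP_nil]
        have : l.length % kn = l.length := Nat.mod_eq_of_lt (by omega)
        simp [this]
        omega
      omega
    · have hd : (l ++ [x]).drop r = l.drop r ++ [x] := List.drop_append_of_le_length h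
      rw [hd, stride_append_singleton kn hkn]
      have hgd : (l ++ [x]).getD l.length 0 = x := by
        rw [List.getD_eq_getElem _ _ (by simp)]
        simp
      have hmodiff : (l.drop r).length % kn = 0 ↔ l.length % kn = r := by
        rw [List.length_drop]
        constructor
        · intro h0
          obtain ⟨q, hq⟩ := Nat.dvd_of_mod_eq_zero h0
          have : l.length = kn * q + r := by omega
          rw [this, Nat.mul_add_mod, Nat.mod_eq_of_lt hr]
        · intro h0
          have := Nat.div_add_mod l.length kn
          rw [h0] at this
          have : l.length - r = kn * (l.length / kn) := by omega
          rw [this, Nat.mul_mod_right]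
      simp only [List.countP_cons, List.countP_nil, hgd, hcongr, ← ih]
      split
      case isTrue h0 =>
        have : l.length % kn = r := hmodiff.mp h0
        rw [List.count_append]
        simp [this]
        by_cases hv : x = v <;> simp [hv]
      case isFalse h0 =>
        have : ¬ (l.length % kn = r) := fun hc => h0 (hmodiff.mpr hc)
        simp [this]

-- ----- B-side: the balance dict -----

theorem bstep_getD (k : Int) (arr target : List Int) (d : PySem.Dict (Int × Int) Int)
    (i : Nat) (key : Int × Int) :
    (bstep k arr target d i).getD key 0 =
      d.getD key 0 + (if (PySem.Int.mod (i : Int) k, arr.getD i 0) = key then 1 else 0)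
        - (if (PySem.Int.mod (i : Int) k, target.getD i 0) = key then 1 else 0) := by
  simp only [bstep, PySem.Dict.getD_insert]
  split_ifs <;> simp_all

theorem bfold_getD (k : Int) (arr target : List Int) (l : List Nat)
    (d : PySem.Dict (Int × Int) Int) (key : Int × Int) :
    (l.foldl (bstep k arr target) d).getD key 0 =
      d.getD key 0
        + (l.countP (fun (i : Nat) => decide ((PySem.Int.mod (i : Int) k, arr.getD i 0) = key)) : Int)
        - (l.countP (fun (i : Nat) => decide ((PySem.Int.mod (i : Int) k, target.getD i 0) = key)) : Int) := by
  induction l generalizing d with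
  | nil => simp
  | cons a t ih =>
    rw [List.foldl_cons, ih, bstep_getD]
    simp only [List.countP_cons]
    split_ifs <;> simp_all <;> omega

theorem bfold_mem_keys (k : Int) (arr target : List Int) (l : List Nat)
    (d : PySem.Dict (Int × Int) Int) (key : Int × Int) :
    key ∈ (l.foldl (bstep k arr target) d).keys ↔
      key ∈ d.keys ∨ ∃ i ∈ l, (PySem.Int.mod (i : Int) k, arr.getD i 0) = key
        ∨ (PySem.Int.mod (i : Int) k, target.getD i 0) = key := by
  induction l generalizing d with
  | nil => simp
  | cons a t ih =>
    rw [List.foldl_cons, ih]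
    simp only [bstep, PySem.Dict.mem_keys_insert, List.mem_cons]
    constructor
    · rintro ((h | h | h) | ⟨i, hi, hk⟩)
      · exact Or.inr ⟨a, Or.inl rfl, Or.inr h.symm⟩
      · exact Or.inr ⟨a, Or.inl rfl, Or.inl h.symm⟩
      · exact Or.inl h
      · exact Or.inr ⟨i, Or.inr hi, hk⟩
    · rintro (h | ⟨i, hi | hi, hk | hk⟩)
      · exact Or.inl (Or.inr (Or.inr h))
      · subst hi; exact Or.inl (Or.inr (Or.inl hk.symm))
      · subst hi; exact Or.inl (Or.inl hk.symm)
      · exact Or.inr ⟨i, hi, Or.inl hk⟩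
      · exact Or.inr ⟨i, hi, Or.inr hk⟩

theorem bfold_nodup_keys (k : Int) (arr target : List Int) (l : List Nat)
    (d : PySem.Dict (Int × Int) Int) (hd : d.keys.Nodup) :
    (l.foldl (bstep k arr target) d).keys.Nodup := by
  induction l generalizing d with
  | nil => exact hd
  | cons a t ih =>
    rw [List.foldl_cons]
    exact ih _ (PySem.Dict.nodup_keys_insert _ _ _ (PySem.Dict.nodup_keys_insert _ _ _ hd))

-- B = true iff for every key the two counts agree
theorem balt_iff (k : Int) (arr target : List Int) :
    ((PySem.Dict.values ((List.range arr.length).foldl (bstep k arr target) PySem.Dict.empty)).all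
        (fun v => v == 0) = true)
      ↔ ∀ key : Int × Int,
          (List.range arr.length).countP (fun (i : Nat) => decide ((PySem.Int.mod (i : Int) k, arr.getD i 0) = key))
            = (List.range arr.length).countP (fun (i : Nat) => decide ((PySem.Int.mod (i : Int) k, target.getD i 0) = key)) := by
  set bal := (List.range arr.length).foldl (bstep k arr target) PySem.Dict.empty with hbal
  have hnd : bal.keys.Nodup := bfold_nodup_keys _ _ _ _ _ (by simp [PySem.Dict.keys_empty])
  have hv : bal.values = bal.keys.map (fun key => bal.getD key 0) :=
    PySem.Dict.values_eq_map_keys bal hnd 0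
  rw [hv, List.all_eq_true]
  constructor
  · intro h key
    by_cases hm : key ∈ bal.keys
    · have := h _ (List.mem_map.mpr ⟨key, hm, rfl⟩)
      rw [beq_iff_eq] at this
      rw [hbal, bfold_getD] at this
      simp only [PySem.Dict.getD_empty] at this
      omega
    · -- key never touched: both counts are zero
      have hno : ∀ i ∈ List.range arr.length,
          ¬ ((PySem.Int.mod (i : Int) k, arr.getD i 0) = key
            ∨ (PySem.Int.mod (i : Int) k, target.getD i 0) = key) := by
        intro i hi hc
        exact hm ((bfold_mem_keys k arr target _ _ key).mpr (Or.inr ⟨i, hi, hc⟩))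
      rw [List.countP_eq_zero.mpr, List.countP_eq_zero.mpr]
      · intro i hi; simpa using fun hc => hno i hi (Or.inr hc)
      · intro i hi; simpa using fun hc => hno i hi (Or.inl hc)
  · intro h v hv'
    obtain ⟨key, _, rfl⟩ := List.mem_map.mp hv'
    rw [beq_iff_eq, hbal, bfold_getD]
    simp only [PySem.Dict.getD_empty]
    have := h key
    omega

-- restricting the ∀-key statement to the residues 0 … kn-1 that actually occur
theorem key_count_iff (kn : Nat) (hkn : 0 < kn) (arr target : List Int) :
    (∀ key : Int × Int,
        (List.range arr.length).countP (fun (i : Nat) => decide ((PySem.Int.mod (i : Int) (kn : Int), arr.getD i 0) = key))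
          = (List.range arr.length).countP (fun (i : Nat) => decide ((PySem.Int.mod (i : Int) (kn : Int), target.getD i 0) = key)))
      ↔ ∀ r < kn, ∀ v : Int,
          (List.range arr.length).countP (fun (i : Nat) => decide (i % kn = r ∧ arr.getD i 0 = v))
            = (List.range arr.length).countP (fun (i : Nat) => decide (i % kn = r ∧ target.getD i 0 = v)) := by
  have hmod : ∀ i : Nat, PySem.Int.mod (i : Int) (kn : Int) = ((i % kn : Nat) : Int) :=
    fun i => PySem.Int.mod_natCast i kn
  have hcast : ∀ (l2 : List Int) (r : Nat) (v : Int),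
      (List.range arr.length).countP
          (fun (i : Nat) => decide ((PySem.Int.mod (i : Int) (kn : Int), l2.getD i 0) = ((r : Int), v)))
        = (List.range arr.length).countP (fun (i : Nat) => decide (i % kn = r ∧ l2.getD i 0 = v)) := by
    intro l2 r v
    apply List.countP_congr
    intro i _
    simp only [hmod, decide_eq_true_eq, Prod.mk.injEq, Nat.cast_inj]
  constructor
  · intro h r hr v
    have := h ((r : Int), v)
    rwa [hcast, hcast] at this
  · intro h key
    obtain ⟨q, v⟩ := key
    by_cases hq : ∃ r : Nat, r < kn ∧ (r : Int) = q
    · obtain ⟨r, hr, rfl⟩ := hq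
      rw [hcast, hcast]
      exact h r hr v
    · -- q is not a residue mod kn: both counts are zero
      rw [List.countP_eq_zero.mpr, List.countP_eq_zero.mpr]
      · intro i _
        simp only [hmod, decide_eq_true_eq, Prod.mk.injEq, not_and]
        intro h1
        exact absurd ⟨i % kn, Nat.mod_lt _ hkn, h1⟩ hq
      · intro i _
        simp only [hmod, decide_eq_true_eq, Prod.mk.injEq, not_and]
        intro h1
        exact absurd ⟨i % kn, Nat.mod_lt _ hkn, h1⟩ hq

-- ===== VERDICT (by name: the statement is the Claim_ definition above) =====
theorem can_sort_spec : Claim_equal_can_sort := by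
  intro n k arr _ hpre
  obtain ⟨hlen, hk⟩ := hpre
  unfold Spec_can_sort can_sort can_sort_alt
  rw [if_neg (not_not_intro hlen), if_neg (not_not_intro hlen)]
  rcases hk with hk1 | hnil
  · obtain ⟨kn, rfl⟩ : ∃ m : Nat, k = (m : Int) := ⟨k.toNat, by omega⟩
    have hkn : 0 < kn := by omega
    simp only [Int.toNat_natCast]
    simp only [groups_eq kn hkn arr arr.length le_rfl, List.take_length, List.map_map,
      Function.comp_def]
    set S := PySem.List.sorted arr (fun x => x) false with hSdef
    have hSsorted : S.Pairwise (· ≤ ·) := PySem.List.sorted_pairwise arr (fun x => x)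
    apply Bool.eq_iff_iff.mpr
    rw [sort_core kn hkn arr, balt_iff, key_count_iff kn hkn, ← hSdef]
    constructor
    · intro h r hr v
      have he := h r hr
      have hp : (stride kn (arr.drop r)).Perm (stride kn (S.drop r)) :=
        (sorted_eq_iff_perm _ _ (((hSsorted).drop).sublist (stride_sublist _ _))).mp he
      have hc := (List.perm_iff_count.mp hp) v
      rw [count_stride kn hkn r hr v arr, count_stride kn hkn r hr v S] at hc
      rw [show S.length = arr.length from PySem.List.length_sorted arr (fun x => x) false] at hc
      exact hc
    · intro h r hr
      apply (sorted_eq_iff_perm _ _ (((hSsorted).drop).sublist (stride_sublist _ _))).mpr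
      apply List.perm_iff_count.mpr
      intro v
      rw [count_stride kn hkn r hr v arr, count_stride kn hkn r hr v S,
        show S.length = arr.length from PySem.List.length_sorted arr (fun x => x) false]
      exact h r hr v
  · subst hnil
    simp [PySem.Dict.values, PySem.Dict.empty]
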